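-- pv_equiv track=rewrite | github.com/elanzuo/NeepWords | src/neepwordextractor/cleaner.py | _expand_parentheses
-- ===== SOURCE A (Python) =====
-- def _expand_parentheses(word: str) -> list[str]:
--     start = word.find("(")
--     if start == -1:
--         return [word]
--     end = word.find(")", start + 1)
--     if end == -1:
--         return [word.replace("(", "").replace(")", "")]
--     prefix = word[:start]
--     optional = word[start + 1 : end]
--     suffix = word[end + 1 :]
--     without_optional = f"{prefix}{suffix}"
--     if not optional:
--         return [without_optional]
--     with_optional = f"{prefix}{optional}{suffix}"
--     expanded: list[str] = []
--     for candidate in (without_optional, with_optional):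
--         expanded.extend(_expand_parentheses(candidate))
--     return expanded
-- ===== SOURCE B (Python) =====
-- def _expand_parentheses(word: str) -> list[str]:
--     results: list[str] = []
--     todo = [word]
--     while todo:
--         cur = todo.pop()
--         if "(" not in cur:
--             results.append(cur)
--             continue
--         head, _, rest = cur.partition("(")
--         if ")" not in rest:
--             results.append("".join(c for c in cur if c not in "()"))
--             continue
--         opt, _, tail = rest.partition(")")
--         if not opt:
--             results.append(head + tail)
--         else:
--             todo.append(head + opt + tail)
--             todo.append(head + tail)
--     return results
-- ===== Notes on version B (the rewrite author's own statement) =====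
-- stated objective: alternative
-- what changed: The pre-order recursion over find/slice indices is replaced by an iterative worklist loop that destructures each candidate with a partition-style split at the first opening/closing parenthesis and strips parentheses with a character filter instead of index arithmetic, find-from and chained replace.
import Mathlib
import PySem

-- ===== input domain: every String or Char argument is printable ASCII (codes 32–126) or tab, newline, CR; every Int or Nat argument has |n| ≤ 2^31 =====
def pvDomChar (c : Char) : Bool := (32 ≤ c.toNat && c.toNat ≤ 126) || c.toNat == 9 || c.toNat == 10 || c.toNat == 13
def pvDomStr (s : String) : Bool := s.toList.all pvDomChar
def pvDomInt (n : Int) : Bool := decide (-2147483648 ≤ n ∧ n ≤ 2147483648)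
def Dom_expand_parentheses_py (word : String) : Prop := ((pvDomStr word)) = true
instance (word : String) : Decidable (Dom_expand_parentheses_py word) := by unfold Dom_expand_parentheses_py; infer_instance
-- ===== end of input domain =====

-- B replaces A's index-based pre-order recursion (find / findFrom / slice / replace) by an
-- iterative worklist loop that destructures each candidate with a split-at-first-character
-- helper and a character filter; return values proved equal on all inputs.

-- ===== PORT A =====
-- A's recursion: every recursive call is on a word at least 2 chars shorter, so
-- fuel = word.length + 1 is a pure totality guard, never exhausted (proved below).
def expandA : Nat → List Char → List (List Char)
  | 0, _ => []
  | fuel + 1, s =>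
    let start := PySem.Chars.find s ['(']
    if start = -1 then [s]
    else
      let stop := PySem.Chars.findFrom s [')'] (start + 1) none
      if stop = -1 then
        [PySem.Chars.replace (PySem.Chars.replace s ['('] []) [')'] []]
      else
        let pre := PySem.List.slice s none (some start)
        let opt := PySem.List.slice s (some (start + 1)) (some stop)
        let suf := PySem.List.slice s (some (stop + 1)) none
        let without := pre ++ suf
        if opt = [] then [without]
        else
          let withOpt := pre ++ opt ++ suf
          [without, withOpt].foldl (fun acc c => acc ++ expandA fuel c) []

def expand_parentheses_py (word : String) : List String :=
  (expandA (word.toList.length + 1) word.toList).map String.ofList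

-- ===== PORT B =====
-- Source B's `head, _, rest = cur.partition(ch)`: the part before the first `ch` and the part
-- after it (`none` when `ch` is absent, Source B's `not in` test).
def splitFirst (ch : Char) : List Char → Option (List Char × List Char)
  | [] => none
  | x :: xs =>
    if x = ch then some ([], xs)
    else (splitFirst ch xs).map (fun p => (x :: p.1, p.2))

-- Source B's `"".join(c for c in cur if c not in "()")`
def stripParens (s : List Char) : List Char :=
  s.filter (fun c => !(c == '(' || c == ')'))

-- Source B's while-loop over the explicit worklist; each pop either emits or pushes strictly
-- shorter words, so fuel = 2 ^ word.length + 1 bounds the pop count (proved below).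
def loopB : Nat → List (List Char) → List (List Char) → List (List Char)
  | 0, _, results => results
  | _ + 1, [], results => results
  | fuel + 1, cur :: rest, results =>
    match splitFirst '(' cur with
    | none => loopB fuel rest (results ++ [cur])
    | some (head, r) =>
      match splitFirst ')' r with
      | none => loopB fuel rest (results ++ [stripParens cur])
      | some (opt, tail) =>
        if opt = [] then loopB fuel rest (results ++ [head ++ tail])
        else loopB fuel ((head ++ tail) :: (head ++ opt ++ tail) :: rest) results

def expand_parentheses_py_alt (word : String) : List String :=
  (loopB (2 ^ word.toList.length + 1) [word.toList] []).map String.ofList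

-- ===== PRECONDITION & SPEC =====
def Spec_expand_parentheses_py (word : String) (out : List String) : Prop := out = expand_parentheses_py_alt word
instance (word : String) (out : List String) : Decidable (Spec_expand_parentheses_py word out) := by unfold Spec_expand_parentheses_py; infer_instance

-- ===== CLAIM (what is proved, stated in full; the proofs are below) =====
def Claim_equal_expand_parentheses_py : Prop := ∀ (word : String), Dom_expand_parentheses_py word → Spec_expand_parentheses_py word (expand_parentheses_py word)

-- ===== LEMMAS AND PROOFS =====

-- the canonical result of A's recursion, with its just-sufficient fuel
def pvR (s : List Char) : List (List Char) := expandA (s.length + 1) s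

-- measure bounding the number of pops B's loop can perform
def pvMeas (stack : List (List Char)) : Nat := (stack.map (fun w => 2 ^ w.length)).sum

-- ---- splitFirst characterisation ----

lemma splitFirst_eq_none {ch : Char} {s : List Char} :
    splitFirst ch s = none ↔ ch ∉ s := by
  induction s with
  | nil => simp [splitFirst]
  | cons x xs ih =>
    by_cases hx : x = ch
    · subst hx; simp [splitFirst]
    · simp [splitFirst, hx, Option.map_eq_none_iff, ih, Ne.symm hx]

lemma splitFirst_eq_some {ch : Char} : ∀ {s a b : List Char},
    splitFirst ch s = some (a, b) → ch ∉ a ∧ s = a ++ ch :: b := by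
  intro s
  induction s with
  | nil => intro a b h; simp [splitFirst] at h
  | cons x xs ih =>
    intro a b h
    by_cases hx : x = ch
    · subst hx
      simp [splitFirst] at h
      obtain ⟨ha, hb⟩ := h
      subst ha; subst hb; simp
    · rw [splitFirst, if_neg hx] at h
      cases hs : splitFirst ch xs with
      | none => rw [hs] at h; simp at h
      | some p =>
        obtain ⟨a', b'⟩ := p
        rw [hs] at h
        simp only [Option.map_some, Option.some.injEq, Prod.mk.injEq] at h
        obtain ⟨ha, hb⟩ := h
        obtain ⟨hni, hexp⟩ := ih hs
        subst hb
        constructor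
        · intro hm
          rw [← ha] at hm
          rcases List.mem_cons.1 hm with h | h
          · exact hx h.symm
          · exact hni h
        · rw [← ha, hexp]; simp

-- ---- replace with a single char and empty replacement = filter ----

lemma replace_go_single (c : Char) : ∀ (fuel : Nat) (l acc : List Char), l.length ≤ fuel →
    PySem.Chars.replace.go [c] [] fuel l acc
      = acc.reverse ++ l.filter (fun x => !(x == c)) := by
  intro fuel
  induction fuel with
  | zero =>
    intro l acc h
    have : l = [] := List.eq_nil_of_length_eq_zero (by omega)
    subst this
    simp [PySem.Chars.replace.go]
  | succ f ih =>
    intro l acc h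
    match l with
    | [] => simp [PySem.Chars.replace.go]
    | x :: t =>
      rw [PySem.Chars.replace.go]
      by_cases hx : x = c
      · subst hx
        have hpre : List.isPrefixOf [x] (x :: t) = true := by
          simp [List.isPrefixOf]
        simp only [hpre, if_true, List.length_cons, List.drop_succ_cons, List.length_nil,
          List.drop_zero, List.reverse_nil, List.nil_append]
        rw [ih t acc (by simp at h; omega)]
        simp
      · have hpre : List.isPrefixOf [c] (x :: t) = false := by
          simp [List.isPrefixOf]
          intro hc; exact absurd hc.symm hx
        simp only [hpre, Bool.false_eq_true, if_false]
        rw [ih t (x :: acc) (by simp at h; omega)]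
        have hbe : (x == c) = false := by simp [hx]
        simp [hbe]

lemma replace_single (c : Char) (s : List Char) :
    PySem.Chars.replace s [c] [] = s.filter (fun x => !(x == c)) := by
  rw [PySem.Chars.replace]
  simp only [List.isEmpty_cons, Bool.false_eq_true, if_false]
  rw [replace_go_single c s.length s [] (le_refl _)]
  simp

lemma strip_eq (s : List Char) :
    PySem.Chars.replace (PySem.Chars.replace s ['('] []) [')'] [] = stripParens s := by
  rw [replace_single, replace_single, List.filter_filter, stripParens]
  congr 1
  funext x
  cases hx1 : x == '(' <;> cases hx2 : x == ')' <;> simp_all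


-- ---- find of a single char ----

lemma find_single_neg {c : Char} {s : List Char} (h : c ∉ s) :
    PySem.Chars.find s [c] = -1 := by
  rw [PySem.Chars.find_eq_neg_one_iff]
  intro hin
  exact h ((List.singleton_infix_iff c s).1 hin)

lemma find_single_pos (c : Char) (a b : List Char) (h : c ∉ a) :
    PySem.Chars.find (a ++ c :: b) [c] = (a.length : Int) := by
  have hin : [c] <:+: a ++ c :: b := (List.singleton_infix_iff c _).2 (by simp)
  have hnn : 0 ≤ PySem.Chars.find (a ++ c :: b) [c] :=
    (PySem.Chars.find_nonneg_iff _ _).2 hin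
  obtain ⟨hpre, hmin⟩ := PySem.Chars.find_spec hnn
  have hat : [c] <+: (a ++ c :: b).drop a.length := by
    rw [List.drop_left]
    exact ⟨b, rfl⟩
  have hnot : ∀ i < a.length, ¬ [c] <+: (a ++ c :: b).drop i := by
    intro i hi hp
    obtain ⟨t, ht⟩ := hp
    have hdrop : (a ++ c :: b).drop i = a.drop i ++ c :: b := by
      rw [List.drop_append_of_le_length (le_of_lt hi)]
    cases hd : a.drop i with
    | nil =>
      have hld : (a.drop i).length = a.length - i := List.length_drop ..
      rw [hd] at hld
      simp at hld
      omega
    | cons x xs =>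
      have hx : x = c := by
        rw [hdrop, hd] at ht
        simpa using congrArg (List.head? ·) ht.symm
      have : x ∈ a := by
        have : x ∈ a.drop i := by rw [hd]; exact List.mem_cons_self ..
        exact List.mem_of_mem_drop this
      rw [hx] at this
      exact h this
  have h1 : (PySem.Chars.find (a ++ c :: b) [c]).toNat ≤ a.length := by
    by_contra hlt
    exact hmin a.length (by omega) hat
  have h2 : a.length ≤ (PySem.Chars.find (a ++ c :: b) [c]).toNat := by
    by_contra hlt
    exact hnot _ (by omega) hpre
  omega

-- ---- the four shapes of pvR, stated over B's destructuring ----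

lemma pvR_no_paren {s : List Char} (h : splitFirst '(' s = none) : pvR s = [s] := by
  rw [pvR, expandA]
  have : PySem.Chars.find s ['('] = -1 := find_single_neg (splitFirst_eq_none.1 h)
  simp [this]

-- common facts once the first '(' is found
lemma pvA_found {s head r : List Char} (h1 : splitFirst '(' s = some (head, r)) :
    PySem.Chars.find s ['('] = (head.length : Int)
    ∧ s = head ++ '(' :: r
    ∧ PySem.Chars.findFrom s [')'] ((head.length : Int) + 1) none
        = if PySem.Chars.find r [')'] = -1 then -1
          else ((head.length : Int) + 1) + PySem.Chars.find r [')'] := by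
  obtain ⟨hni, hs⟩ := splitFirst_eq_some h1
  have hf : PySem.Chars.find s ['('] = (head.length : Int) := by
    rw [hs]; exact find_single_pos _ _ _ hni
  have hlen : head.length + 1 ≤ s.length := by
    rw [hs]; simp
  have hdrop : s.drop (head.length + 1) = r := by
    rw [hs]
    have : head ++ '(' :: r = (head ++ ['(']) ++ r := by simp
    rw [this]
    have hl : (head ++ ['(']).length = head.length + 1 := by simp
    rw [← hl, List.drop_left]
  have hcast : (head.length : Int) + 1 = ((head.length + 1 : Nat) : Int) := by push_cast; ring
  refine ⟨hf, hs, ?_⟩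
  rw [hcast, PySem.Chars.findFrom_natCast s [')'] (head.length + 1) hlen, hdrop]

lemma pvR_unmatched {s head r : List Char} (h1 : splitFirst '(' s = some (head, r))
    (h2 : splitFirst ')' r = none) : pvR s = [stripParens s] := by
  obtain ⟨hf, hs, hff⟩ := pvA_found h1
  have hfr : PySem.Chars.find r [')'] = -1 := find_single_neg (splitFirst_eq_none.1 h2)
  rw [pvR, expandA]
  simp only [hf, hff, hfr, if_true]
  have hne : (head.length : Int) ≠ -1 := by omega
  simp [hne, strip_eq]

-- common slice facts when both parens are found
lemma pvA_slices {s head r opt tail : List Char} (h1 : splitFirst '(' s = some (head, r))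
    (h2 : splitFirst ')' r = some (opt, tail)) :
    PySem.Chars.find s ['('] = (head.length : Int)
    ∧ PySem.Chars.findFrom s [')'] ((head.length : Int) + 1) none
        = ((head.length + 1 + opt.length : Nat) : Int)
    ∧ PySem.List.slice s none (some (head.length : Int)) = head
    ∧ PySem.List.slice s (some ((head.length : Int) + 1))
        (some ((head.length + 1 + opt.length : Nat) : Int)) = opt
    ∧ PySem.List.slice s (some (((head.length + 1 + opt.length : Nat) : Int) + 1)) none = tail
    ∧ s.length = head.length + opt.length + tail.length + 2 := by
  obtain ⟨hf, hs, hff⟩ := pvA_found h1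
  obtain ⟨hno, hr⟩ := splitFirst_eq_some h2
  have hfr : PySem.Chars.find r [')'] = (opt.length : Int) := by
    rw [hr]; exact find_single_pos _ _ _ hno
  have hfr' : PySem.Chars.find r [')'] ≠ -1 := by rw [hfr]; omega
  have hse : s = (head ++ '(' :: opt ++ [')']) ++ tail := by
    rw [hs, hr]; simp
  have hlens : s.length = head.length + opt.length + tail.length + 2 := by
    rw [hse]; simp; omega
  refine ⟨hf, ?_, ?_, ?_, ?_, hlens⟩
  · rw [hff, if_neg hfr', hfr]; push_cast; ring
  · rw [PySem.List.slice_to_natCast, hs]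
    exact List.take_left ..
  · have : (head.length : Int) + 1 = ((head.length + 1 : Nat) : Int) := by push_cast; ring
    rw [this, PySem.List.slice_natCast]
    have hdrop : s.drop (head.length + 1) = r := by
      rw [hs]
      have he : head ++ '(' :: r = (head ++ ['(']) ++ r := by simp
      have hl : (head ++ ['(']).length = head.length + 1 := by simp
      rw [he, ← hl, List.drop_left]
    rw [hdrop]
    have : head.length + 1 + opt.length - (head.length + 1) = opt.length := by omega
    rw [this, hr, List.take_left]
  · have : ((head.length + 1 + opt.length : Nat) : Int) + 1
        = ((head.length + 1 + opt.length + 1 : Nat) : Int) := by push_cast; ring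
    rw [this, PySem.List.slice_from_natCast, hse]
    have hl : (head ++ '(' :: opt ++ [')']).length = head.length + 1 + opt.length + 1 := by
      simp; omega
    rw [← hl, List.drop_left]

lemma pvR_empty_opt {s head r tail : List Char} (h1 : splitFirst '(' s = some (head, r))
    (h2 : splitFirst ')' r = some ([], tail)) : pvR s = [head ++ tail] := by
  obtain ⟨hf, hff, hsl1, hsl2, hsl3, _⟩ := pvA_slices h1 h2
  have hne1 : (head.length : Int) ≠ -1 := by omega
  have hne2 : ((head.length + 1 + ([] : List Char).length : Nat) : Int) ≠ -1 := by
    push_cast; omega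
  rw [pvR, expandA]
  simp only [hf, hff, hsl1, hsl2, hsl3]
  rw [if_neg hne1, if_neg hne2]
  simp

-- fuel irrelevance for A's recursion: any fuel above the word length gives pvR
lemma expandA_fuel (fuel : Nat) : ∀ s : List Char, s.length < fuel →
    expandA fuel s = pvR s := by
  induction fuel using Nat.strong_induction_on with
  | _ fuel IH =>
    intro s hlen
    match fuel, hlen with
    | f + 1, hlen =>
      cases hsplit : splitFirst '(' s with
      | none =>
        have : PySem.Chars.find s ['('] = -1 := find_single_neg (splitFirst_eq_none.1 hsplit)
        rw [pvR_no_paren hsplit, expandA]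
        simp [this]
      | some hr =>
        obtain ⟨head, r⟩ := hr
        cases hsplit2 : splitFirst ')' r with
        | none =>
          obtain ⟨hf, hs, hff⟩ := pvA_found hsplit
          have hfr : PySem.Chars.find r [')'] = -1 :=
            find_single_neg (splitFirst_eq_none.1 hsplit2)
          rw [pvR_unmatched hsplit hsplit2, expandA]
          simp only [hf, hff, hfr, if_true]
          have hne : (head.length : Int) ≠ -1 := by omega
          simp [hne, strip_eq]
        | some pt =>
          obtain ⟨opt, tail⟩ := pt
          obtain ⟨hf, hff, hsl1, hsl2, hsl3, hlens⟩ := pvA_slices hsplit hsplit2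
          have hne1 : (head.length : Int) ≠ -1 := by omega
          have hne2 : ((head.length + 1 + opt.length : Nat) : Int) ≠ -1 := by push_cast; omega
          by_cases hopt : opt = []
          · subst hopt
            rw [pvR_empty_opt hsplit hsplit2, expandA]
            simp only [hf, hff, hsl1, hsl2, hsl3]
            rw [if_neg hne1, if_neg hne2]
            simp
          · rw [expandA]
            simp only [hf, hff, hsl1, hsl2, hsl3]
            rw [if_neg hne1, if_neg hne2, if_neg hopt]
            rw [pvR, expandA]
            simp only [hf, hff, hsl1, hsl2, hsl3]
            rw [if_neg hne1, if_neg hne2, if_neg hopt]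
            simp only [List.foldl_cons, List.foldl_nil, List.nil_append]
            rw [IH f (by omega) _ (by simp only [List.length_append]; omega),
                IH s.length (by omega) _ (by simp only [List.length_append]; omega),
                IH f (by omega) _ (by simp only [List.length_append]; omega),
                IH s.length (by omega) _ (by simp only [List.length_append]; omega)]

lemma pvR_branch {s head r opt tail : List Char} (h1 : splitFirst '(' s = some (head, r))
    (h2 : splitFirst ')' r = some (opt, tail)) (h3 : opt ≠ []) :
    pvR s = pvR (head ++ tail) ++ pvR (head ++ opt ++ tail) := by
  obtain ⟨hf, hff, hsl1, hsl2, hsl3, hlens⟩ := pvA_slices h1 h2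
  have hne1 : (head.length : Int) ≠ -1 := by omega
  have hne2 : ((head.length + 1 + opt.length : Nat) : Int) ≠ -1 := by push_cast; omega
  rw [pvR, expandA]
  simp only [hf, hff, hsl1, hsl2, hsl3]
  rw [if_neg hne1, if_neg hne2, if_neg h3]
  simp only [List.foldl_cons, List.foldl_nil, List.nil_append]
  rw [expandA_fuel s.length _ (by simp only [List.length_append]; omega),
      expandA_fuel s.length _ (by simp only [List.length_append]; omega)]

-- ---- B's loop computes the concatenation of pvR over the worklist ----

lemma loopB_spec (fuel : Nat) : ∀ (stack res : List (List Char)), pvMeas stack < fuel →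
    loopB fuel stack res = res ++ stack.flatMap pvR := by
  induction fuel with
  | zero => intro stack res h; omega
  | succ f IH =>
    intro stack res h
    match stack with
    | [] => simp [loopB]
    | cur :: rest =>
      have hm : pvMeas (cur :: rest) = 2 ^ cur.length + pvMeas rest := by simp [pvMeas]
      have hpos : 1 ≤ 2 ^ cur.length := Nat.one_le_two_pow
      rw [loopB]
      cases hsplit : splitFirst '(' cur with
      | none =>
        rw [IH rest _ (by omega)]
        simp [pvR_no_paren hsplit]
      | some hr =>
        obtain ⟨head, r⟩ := hr
        cases hsplit2 : splitFirst ')' r with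
        | none =>
          simp only [hsplit2]
          rw [IH rest _ (by omega)]
          simp [pvR_unmatched hsplit hsplit2]
        | some pt =>
          obtain ⟨opt, tail⟩ := pt
          simp only [hsplit2]
          by_cases hopt : opt = []
          · subst hopt
            simp only [if_true]
            rw [IH rest _ (by omega)]
            simp [pvR_empty_opt hsplit hsplit2]
          · simp only [if_neg hopt]
            have hlens := (pvA_slices hsplit hsplit2).2.2.2.2.2
            have hcl : 2 ≤ cur.length := by omega
            have hp1 : 2 ^ (cur.length - 2) + 2 ^ (cur.length - 2) + 1 ≤ 2 ^ cur.length := by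
              have e1 : 2 ^ (cur.length - 2) + 2 ^ (cur.length - 2) = 2 ^ (cur.length - 1) := by
                rw [← two_mul, ← pow_succ']
                congr 1
                omega
              have e2 : 2 ^ (cur.length - 1) < 2 ^ cur.length :=
                Nat.pow_lt_pow_right (by norm_num) (by omega)
              omega
            have hb1 : 2 ^ (head ++ tail).length ≤ 2 ^ (cur.length - 2) :=
              Nat.pow_le_pow_right (by norm_num) (by simp only [List.length_append]; omega)
            have hb2 : 2 ^ (head ++ opt ++ tail).length ≤ 2 ^ (cur.length - 2) :=
              Nat.pow_le_pow_right (by norm_num) (by simp only [List.length_append]; omega)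
            have hms : pvMeas ((head ++ tail) :: (head ++ opt ++ tail) :: rest) < f := by
              simp only [pvMeas, List.map_cons, List.sum_cons] at h hm ⊢
              omega
            rw [IH _ res hms]
            simp [pvR_branch hsplit hsplit2 hopt]

-- ===== VERDICT (by name: the statement is the Claim_ definition above) =====
theorem expand_parentheses_py_spec : Claim_equal_expand_parentheses_py := by
  intro word _
  unfold Spec_expand_parentheses_py expand_parentheses_py expand_parentheses_py_alt
  have hms : pvMeas [word.toList] < 2 ^ word.toList.length + 1 := by simp [pvMeas]
  rw [loopB_spec _ _ _ hms]
  simp [pvR]
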